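-- pv_equiv track=rewrite | github.com/spglib/spglib | database/make_Wyckoff_db.py | get_data_arrays
-- ===== SOURCE A (Python) =====
-- def get_data_arrays(encoded_positions):
--     len_wyckoffs = [0]
--     len_site = [0]
--     sum_wyckoffs = 1
--     sum_site = 1
--     encpos_flat = [0]
--     for h in encoded_positions:
--         len_wyckoffs.append(sum_wyckoffs)
--         sum_wyckoffs += len(h)
--         for w in h:
--             len_site.append(sum_site)
--             sum_site += len(w)
--             encpos_flat += w
--
--     len_wyckoffs.append(sum_wyckoffs)
--     len_site.append(sum_site)
--
--     return len_wyckoffs, len_site, encpos_flat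
-- ===== SOURCE B (Python) =====
-- def _acc(init, xs):
--     res = [init]
--     for x in xs:
--         init += x
--         res.append(init)
--     return res
--
--
-- def get_data_arrays(encoded_positions):
--     wlens = [len(h) for h in encoded_positions]
--     slens = [len(w) for h in encoded_positions for w in h]
--     len_wyckoffs = [0] + _acc(1, wlens)
--     len_site = [0] + _acc(1, slens)
--     encpos_flat = [0] + [x for h in encoded_positions for w in h for x in w]
--     return len_wyckoffs, len_site, encpos_flat
-- ===== Notes on version B (the rewrite author's own statement) =====
-- stated objective: simpler
-- what changed: A's single fused nested loop carrying five pieces of mutable state is split into three independent phases: two flat length lists with an explicit prefix-sum helper, and one flatten comprehension.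
import Mathlib
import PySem

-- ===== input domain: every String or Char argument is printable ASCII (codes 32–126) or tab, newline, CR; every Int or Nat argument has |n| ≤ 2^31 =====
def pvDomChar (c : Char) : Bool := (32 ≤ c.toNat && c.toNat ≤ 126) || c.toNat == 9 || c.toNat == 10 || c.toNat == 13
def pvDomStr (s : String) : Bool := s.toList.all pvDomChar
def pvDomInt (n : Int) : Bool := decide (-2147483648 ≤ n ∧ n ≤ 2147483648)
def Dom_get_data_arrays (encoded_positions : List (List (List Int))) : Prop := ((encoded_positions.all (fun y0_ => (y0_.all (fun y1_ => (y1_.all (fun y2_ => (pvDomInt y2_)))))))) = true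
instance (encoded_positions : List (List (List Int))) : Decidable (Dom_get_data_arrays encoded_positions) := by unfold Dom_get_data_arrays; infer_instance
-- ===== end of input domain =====

-- B splits A's single fused nested loop into three independent passes (two explicit prefix-sum lists and one flatten); objective: simpler.


-- ===== PORT A =====
-- inner 'for w in h' loop: state (len_site, sum_site, encpos_flat)
def aInner (h : List (List Int)) (ls : List Int) (ss : Int) (fl : List Int) :
    List Int × Int × List Int :=
  match h with
  | [] => (ls, ss, fl)
  | w :: rest => aInner rest (ls ++ [ss]) (ss + (w.length : Int)) (fl ++ w)

-- outer 'for h in encoded_positions' loop: state (len_wyckoffs, len_site, sum_wyckoffs, sum_site, encpos_flat)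
def aOuter (eps : List (List (List Int))) (lw ls : List Int) (sw ss : Int) (fl : List Int) :
    List Int × List Int × Int × Int × List Int :=
  match eps with
  | [] => (lw, ls, sw, ss, fl)
  | h :: rest =>
      let lw' := lw ++ [sw]
      let sw' := sw + (h.length : Int)
      let r := aInner h ls ss fl
      aOuter rest lw' r.1 sw' r.2.1 r.2.2

def get_data_arrays (encoded_positions : List (List (List Int))) : List Int × List Int × List Int :=
  let r := aOuter encoded_positions [0] [0] 1 1 [0]
  (r.1 ++ [r.2.2.1], r.2.1 ++ [r.2.2.2.1], r.2.2.2.2)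

-- ===== PORT B =====
-- port of Source B's _acc (hand-written prefix-sum helper): res = [init, init+x1, init+x1+x2, …]
def bAcc (init : Int) (xs : List Int) : List Int :=
  match xs with
  | [] => [init]
  | x :: rest => init :: bAcc (init + x) rest

def get_data_arrays_alt (encoded_positions : List (List (List Int))) : List Int × List Int × List Int :=
  let wlens := encoded_positions.map (fun h => (h.length : Int))
  let slens := encoded_positions.flatMap (fun h => h.map (fun w => (w.length : Int)))
  (0 :: bAcc 1 wlens,
   0 :: bAcc 1 slens,
   0 :: encoded_positions.flatMap (fun h => h.flatMap (fun w => w)))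

-- ===== PRECONDITION & SPEC =====
def Spec_get_data_arrays (encoded_positions : List (List (List Int))) (out : List Int × List Int × List Int) : Prop := out = get_data_arrays_alt encoded_positions
instance (encoded_positions : List (List (List Int))) (out : List Int × List Int × List Int) : Decidable (Spec_get_data_arrays encoded_positions out) := by unfold Spec_get_data_arrays; infer_instance

-- ===== CLAIM (what is proved, stated in full; the proofs are below) =====
def Claim_equal_get_data_arrays : Prop := ∀ (encoded_positions : List (List (List Int))), Dom_get_data_arrays encoded_positions → Spec_get_data_arrays encoded_positions (get_data_arrays encoded_positions)

-- ===== LEMMAS AND PROOFS =====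

-- prefix of bAcc without its final cumulative element
def partAcc (s : Int) (xs : List Int) : List Int :=
  match xs with
  | [] => []
  | x :: rest => s :: partAcc (s + x) rest

theorem partAcc_concat (xs : List Int) : ∀ s : Int, partAcc s xs ++ [s + xs.sum] = bAcc s xs := by
  induction xs with
  | nil => intro s; simp [partAcc, bAcc]
  | cons x rest ih =>
      intro s
      simp only [partAcc, bAcc, List.cons_append, List.sum_cons]
      rw [← add_assoc, ih]

theorem partAcc_append (xs ys : List Int) : ∀ s : Int,
    partAcc s (xs ++ ys) = partAcc s xs ++ partAcc (s + xs.sum) ys := by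
  induction xs with
  | nil => intro s; simp [partAcc]
  | cons x rest ih =>
      intro s
      simp only [List.cons_append, partAcc, List.sum_cons, ih]
      rw [← add_assoc]

theorem aInner_spec (h : List (List Int)) : ∀ (ls : List Int) (ss : Int) (fl : List Int),
    aInner h ls ss fl =
      (ls ++ partAcc ss (h.map (fun w => (w.length : Int))),
       ss + (h.map (fun w => (w.length : Int))).sum,
       fl ++ h.flatMap (fun w => w)) := by
  induction h with
  | nil => intro ls ss fl; simp [aInner, partAcc]
  | cons w rest ih =>
      intro ls ss fl
      simp only [aInner, ih, List.map_cons, List.sum_cons, List.flatMap_cons, partAcc,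
        List.append_assoc, List.singleton_append]
      ring_nf

theorem aOuter_spec (eps : List (List (List Int))) :
    ∀ (lw ls : List Int) (sw ss : Int) (fl : List Int),
    aOuter eps lw ls sw ss fl =
      (lw ++ partAcc sw (eps.map (fun h => (h.length : Int))),
       ls ++ partAcc ss (eps.flatMap (fun h => h.map (fun w => (w.length : Int)))),
       sw + (eps.map (fun h => (h.length : Int))).sum,
       ss + (eps.flatMap (fun h => h.map (fun w => (w.length : Int)))).sum,
       fl ++ eps.flatMap (fun h => h.flatMap (fun w => w))) := by
  induction eps with
  | nil => intro lw ls sw ss fl; simp [aOuter, partAcc]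
  | cons h rest ih =>
      intro lw ls sw ss fl
      simp only [aOuter, aInner_spec, ih, List.map_cons, List.sum_cons, List.flatMap_cons,
        partAcc, List.append_assoc, List.singleton_append, List.sum_append, partAcc_append]
      ring_nf

-- ===== VERDICT (by name: the statement is the Claim_ definition above) =====
theorem get_data_arrays_spec : Claim_equal_get_data_arrays := by
  intro eps _
  show get_data_arrays eps = get_data_arrays_alt eps
  simp only [get_data_arrays, get_data_arrays_alt, aOuter_spec]
  refine Prod.ext ?_ (Prod.ext ?_ ?_) <;>
    simp [partAcc_concat]
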